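-- pv_equiv track=rewrite | github.com/HourGlss/aoc | day11.py | check_non_overlapping_pairs
-- ===== SOURCE A (Python) =====
-- def check_non_overlapping_pairs(pswd: str) -> bool:
--     last = -1
--     pairs = []
--     for i, c in enumerate(pswd):
--         if last == -1:
--             last = c
--         else:
--             if last == c:
--                 pairs.append(f"{c}{c}")
--                 last = -1
--             else:
--                 last = c
--     return len(pairs) >= 2
-- ===== SOURCE B (Python) =====
-- def check_non_overlapping_pairs(pswd: str) -> bool:
--     # Stage 1: run-length encode the string into maximal runs of equal chars.
--     runs = []
--     for c in pswd:
--         if runs and runs[-1][0] == c: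
--             runs[-1] = (c, runs[-1][1] + 1)
--         else:
--             runs.append((c, 1))
--     # Stage 2: a maximal run of length n contains n // 2 disjoint adjacent pairs.
--     return sum(n // 2 for _, n in runs) >= 2
-- ===== Notes on version B (the rewrite author's own statement) =====
-- stated objective: alternative
-- what changed: Replaces A's single-pass state machine (a 'last' sentinel plus a list of pair strings) by a two-stage computation: first run-length encode the string into maximal runs of equal characters, then sum n//2 over the run lengths (each maximal run of length n holds exactly n//2 disjoint adjacent pairs) and compare with 2.
import Mathlib
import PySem

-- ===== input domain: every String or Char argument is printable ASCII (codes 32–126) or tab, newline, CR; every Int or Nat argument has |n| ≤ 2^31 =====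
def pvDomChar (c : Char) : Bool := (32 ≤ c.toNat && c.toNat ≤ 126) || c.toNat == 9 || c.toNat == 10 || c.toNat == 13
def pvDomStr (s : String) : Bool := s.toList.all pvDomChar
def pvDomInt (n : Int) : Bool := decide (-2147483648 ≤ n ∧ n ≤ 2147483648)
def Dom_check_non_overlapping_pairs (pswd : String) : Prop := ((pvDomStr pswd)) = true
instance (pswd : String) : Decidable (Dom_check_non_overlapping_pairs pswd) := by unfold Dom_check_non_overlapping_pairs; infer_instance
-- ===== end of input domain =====

-- B replaces A's state-machine scan by a two-stage computation: run-length encode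
-- the string, then sum n//2 over the run lengths; same results (alternative form).

-- ===== PORT A =====
-- A's for-loop: state is 'last' (int -1 or a char, modelled as Option Char) and the
-- accumulated list 'pairs'; branches in A's order.
def pvALoop : List Char → Option Char → List String → List String
  | [], _, pairs => pairs
  | c :: rest, last, pairs =>
    match last with
    | none => pvALoop rest (some c) pairs            -- last == -1: last = c
    | some l =>
      if l == c then pvALoop rest none (pairs ++ [String.ofList [c, c]])  -- pairs.append(f"{c}{c}"); last = -1
      else pvALoop rest (some c) pairs               -- last = c

def check_non_overlapping_pairs (pswd : String) : Bool :=
  decide ((pvALoop pswd.toList none []).length ≥ 2)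

-- ===== PORT B =====
-- Stage 1 of Source B: the run-length-encoding loop. The Python list is mutated at its
-- last element (runs[-1]); the port keeps the accumulator reversed (head = last run)
-- and reverses it when the loop ends, so each step touches only the head.
def pvRLE : List Char → List (Char × Int) → List (Char × Int)
  | [], acc => acc.reverse
  | c :: rest, acc =>
    match acc with
    | (c0, n) :: tl =>
      if c0 == c then pvRLE rest ((c0, n + 1) :: tl)       -- runs[-1] = (c, runs[-1][1] + 1)
      else pvRLE rest ((c, 1) :: (c0, n) :: tl)            -- runs.append((c, 1))
    | [] => pvRLE rest [(c, 1)]                            -- runs.append((c, 1))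

-- Stage 2: sum(n // 2 for _, n in runs) >= 2
def check_non_overlapping_pairs_alt (pswd : String) : Bool :=
  decide (((pvRLE pswd.toList []).map (fun p => PySem.Int.floordiv p.2 2)).sum ≥ 2)

-- ===== PRECONDITION & SPEC =====
def Spec_check_non_overlapping_pairs (pswd : String) (out : Bool) : Prop := out = check_non_overlapping_pairs_alt pswd
instance (pswd : String) (out : Bool) : Decidable (Spec_check_non_overlapping_pairs pswd out) := by unfold Spec_check_non_overlapping_pairs; infer_instance

-- ===== CLAIM (what is proved, stated in full; the proofs are below) =====
def Claim_equal_check_non_overlapping_pairs : Prop := ∀ (pswd : String), Dom_check_non_overlapping_pairs pswd → Spec_check_non_overlapping_pairs pswd (check_non_overlapping_pairs pswd)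

-- ===== LEMMAS AND PROOFS =====

-- Length of A's pair list, as a function of the remaining input and pending char.
def pvP (last : Option Char) (l : List Char) : Nat := (pvALoop l last []).length

def pvSumf (acc : List (Char × Int)) : Int := (acc.map (fun p => PySem.Int.floordiv p.2 2)).sum

theorem pvALoop_len : ∀ (l : List Char) (last : Option Char) (ps : List String),
    (pvALoop l last ps).length = ps.length + pvP last l := by
  intro l
  induction l with
  | nil => intro last ps; simp [pvALoop, pvP]
  | cons c rest ih =>
    intro last ps
    match last with
    | none =>
      simp only [pvALoop, pvP]
      rw [ih, ih]
      simp
    | some l0 =>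
      by_cases h : l0 == c
      · simp only [pvALoop, pvP, h, if_pos]
        rw [ih, ih]
        simp
        omega
      · simp only [pvALoop, pvP, h, Bool.false_eq_true, if_false]
        rw [ih, ih]
        simp

-- Key invariant: the B sum over the final runs equals the sum over the runs already
-- closed plus n//2 for the open run plus A's greedy pair count of the rest, where the
-- open run leaves a pending character exactly when its length is odd.
theorem pvRLE_sum : ∀ (l : List Char) (c0 : Char) (n : Int) (tl : List (Char × Int)),
    1 ≤ n →
    pvSumf (pvRLE l ((c0, n) :: tl)) =
      PySem.Int.floordiv n 2 + pvSumf tl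
        + (pvP (if n % 2 = 1 then some c0 else none) l : Int) := by
  intro l
  induction l with
  | nil =>
    intro c0 n tl hn
    simp [pvRLE, pvSumf, pvP, pvALoop]
    ring
  | cons c rest ih =>
    intro c0 n tl hn
    by_cases h : c0 == c
    · have hc : c0 = c := by simpa using h
      subst hc
      simp only [pvRLE, h, if_pos]
      rw [ih c0 (n + 1) tl (by omega)]
      have hfd : ∀ m : Int, PySem.Int.floordiv m 2 = m / 2 := fun m =>
        PySem.Int.floordiv_eq_ediv_of_pos (by omega)
      by_cases h1 : n % 2 = 1
      · -- n odd: pending c0 pairs with c = c0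
        have h2 : ¬ ((n + 1) % 2 = 1) := by omega
        have h3 : pvP (some c0) (c0 :: rest) = pvP none rest + 1 := by
          simp only [pvP, pvALoop, beq_self_eq_true, if_pos]
          rw [pvALoop_len]
          simp only [pvP, List.nil_append, List.length_cons, List.length_nil]
          omega
        have h4 : (n + 1) / 2 = n / 2 + 1 := by omega
        simp only [h1, h2, if_pos, hfd, ite_false, h3, h4]
        push_cast
        simp only [pvP]
        ring
      · -- n even: pending appears after consuming c
        have h2 : (n + 1) % 2 = 1 := by omega
        have h3 : pvP none (c0 :: rest) = pvP (some c0) rest := by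
          simp [pvP, pvALoop]
        have h4 : (n + 1) / 2 = n / 2 := by omega
        simp only [h1, h2, if_pos, hfd, ite_false, h3, h4]
    · simp only [pvRLE, h, Bool.false_eq_true, if_false]
      rw [ih c 1 ((c0, n) :: tl) (by omega)]
      have hcne : c0 ≠ c := by simpa using h
      have hpend : pvP (if n % 2 = 1 then some c0 else none) (c :: rest) = pvP (some c) rest := by
        by_cases h1 : n % 2 = 1
        · simp only [h1, if_pos, pvP, pvALoop]
          have hb : (c0 == c) = false := by simpa using hcne
          simp [hb]
        · simp [h1, pvP, pvALoop]
      rw [hpend]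
      simp only [pvSumf, List.map_cons, List.sum_cons]
      simp

-- ===== VERDICT (by name: the statement is the Claim_ definition above) =====
theorem check_non_overlapping_pairs_spec : Claim_equal_check_non_overlapping_pairs := by
  intro pswd _
  unfold Spec_check_non_overlapping_pairs check_non_overlapping_pairs check_non_overlapping_pairs_alt
  have key : pvSumf (pvRLE pswd.toList []) = (pvP none pswd.toList : Int) := by
    match hl : pswd.toList with
    | [] => simp [pvRLE, pvSumf, pvP, pvALoop]
    | c :: rest =>
      simp only [pvRLE]
      rw [pvRLE_sum rest c 1 [] (by omega)]
      have : PySem.Int.floordiv 1 2 = 0 := by decide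
      rw [this]
      have : pvP none (c :: rest) = pvP (some c) rest := by simp [pvP, pvALoop]
      rw [this]
      simp [pvSumf]
  have : ((pvRLE pswd.toList []).map (fun p => PySem.Int.floordiv p.2 2)).sum
      = (pvP none pswd.toList : Int) := key
  rw [this]
  have : (pvALoop pswd.toList none []).length = pvP none pswd.toList := rfl
  rw [this]
  congr 1
  simp only [eq_iff_iff]
  constructor
  · intro h; exact_mod_cast Nat.cast_le.mpr h
  · intro h; exact_mod_cast h
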